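-- pv_equiv track=rewrite | github.com/kakderushi/Python-Programming | TCSNQTSHEET/13.py | repeatingElement
-- ===== SOURCE A (Python) =====
-- def repeatingElement(arr,n):
--     if n==0 or n==1:
--         return
--
--     temp=[]
--
--     for i in range(n-1):
--         for j in range(i+1,n):
--             if arr[i]==arr[j]:
--                 temp.append(arr[i])
--     return temp
-- ===== SOURCE B (Python) =====
-- def repeatingElement(arr, n):
--     if n == 0 or n == 1:
--         return
--
--     cnt = {}
--     for i in range(n):
--         v = arr[i]
--         cnt[v] = cnt.get(v, 0) + 1
--
--     out = []
--     for i in range(n):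
--         v = arr[i]
--         cnt[v] -= 1
--         out += [v] * cnt[v]
--     return out
-- ===== Notes on version B (the rewrite author's own statement) =====
-- stated objective: alternative
-- what changed: Replaced the quadratic all-pairs index scan by two linear passes over a dict of element counts: build counts of the first n entries, then emit each element repeated by its remaining later-equal count; total work is O(n + |output|), but the output itself can be quadratic-size, so no speed is claimed.
import Mathlib
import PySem

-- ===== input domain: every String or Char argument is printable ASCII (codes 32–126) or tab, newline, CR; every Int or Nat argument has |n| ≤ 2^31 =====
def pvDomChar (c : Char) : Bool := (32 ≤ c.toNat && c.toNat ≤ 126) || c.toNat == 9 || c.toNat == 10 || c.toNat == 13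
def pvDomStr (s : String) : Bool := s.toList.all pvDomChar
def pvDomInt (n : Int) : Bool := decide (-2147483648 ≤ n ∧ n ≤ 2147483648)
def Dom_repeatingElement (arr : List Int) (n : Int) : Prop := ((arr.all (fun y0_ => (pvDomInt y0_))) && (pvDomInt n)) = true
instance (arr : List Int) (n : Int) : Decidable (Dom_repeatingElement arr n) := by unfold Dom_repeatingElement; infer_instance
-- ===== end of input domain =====

-- B replaces A's all-pairs index scan by two passes over a dict of element counts (work proportional to n plus the output size).

-- ===== PORT A =====
-- pyGetD is exact here: Pre_ keeps every used index in range (Python raises IndexError outside Pre_).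
def repeatingElement (arr : List Int) (n : Int) : Option (List Int) :=
  if n == 0 || n == 1 then none
  else some ((PySem.List.pyRange 0 (n - 1) 1).foldl
    (fun temp i => (PySem.List.pyRange (i + 1) n 1).foldl
      (fun t j => if PySem.List.pyGetD arr i 0 == PySem.List.pyGetD arr j 0
                  then t ++ [PySem.List.pyGetD arr i 0] else t) temp) [])

-- ===== PORT B =====
-- cnt[v] -= 1 followed by [v] * cnt[v]: the list read of cnt[v] is the freshly stored value st.1.getD v 0 - 1.
def repeatingElement_alt (arr : List Int) (n : Int) : Option (List Int) :=
  if n == 0 || n == 1 then none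
  else
    let cnt := (PySem.List.pyRange 0 n 1).foldl
      (fun d i => d.insert (PySem.List.pyGetD arr i 0)
                    (d.getD (PySem.List.pyGetD arr i 0) 0 + 1))
      (PySem.Dict.empty : PySem.Dict Int Int)
    some (((PySem.List.pyRange 0 n 1).foldl
      (fun (st : PySem.Dict Int Int × List Int) i =>
        (st.1.insert (PySem.List.pyGetD arr i 0) (st.1.getD (PySem.List.pyGetD arr i 0) 0 - 1),
         st.2 ++ List.replicate (st.1.getD (PySem.List.pyGetD arr i 0) 0 - 1).toNat (PySem.List.pyGetD arr i 0)))
      (cnt, [])).2)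

-- ===== PRECONDITION & SPEC =====
-- Pre_ excludes exactly the inputs where Python A raises IndexError: 2 ≤ n but n > len(arr).
def Pre_repeatingElement (arr : List Int) (n : Int) : Prop := n ≤ 1 ∨ n ≤ (arr.length : Int)
instance (arr : List Int) (n : Int) : Decidable (Pre_repeatingElement arr n) := by
  unfold Pre_repeatingElement; infer_instance
def pvWitness_repeatingElement : List Int × Int := ([1, 2, 1], 3)

def Spec_repeatingElement (arr : List Int) (n : Int) (out : Option (List Int)) : Prop := out = repeatingElement_alt arr n
instance (arr : List Int) (n : Int) (out : Option (List Int)) : Decidable (Spec_repeatingElement arr n out) := by unfold Spec_repeatingElement; infer_instance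

-- ===== CLAIM (what is proved, stated in full; the proofs are below) =====
def Claim_equal_repeatingElement : Prop := ∀ (arr : List Int) (n : Int), Dom_repeatingElement arr n → Pre_repeatingElement arr n → Spec_repeatingElement arr n (repeatingElement arr n)

-- ===== LEMMAS AND PROOFS =====

-- the common value both loops compute on the n-element prefix
def pvS : List Int → List Int
  | [] => []
  | v :: rest => List.replicate (rest.count v) v ++ pvS rest

lemma pv_filter_map_const (x : Int) (l : List Int) :
    (l.filter (fun y => x == y)).map (fun _ => x) = List.replicate (l.count x) x := by
  induction l with
  | nil => simp
  | cons y ys ih =>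
    by_cases h : x = y
    · subst h
      simp [List.replicate_succ', ih, ← List.replicate_succ]
    · simp [h, Ne.symm h, ih]

lemma pv_getD_eq_take {arr : List Int} {n i : Int} (hn : n ≤ (arr.length : Int))
    (h0 : 0 ≤ i) (hi : i < n) :
    PySem.List.pyGetD arr i 0 = PySem.List.pyGetD (arr.take n.toNat) i 0 := by
  have hlen : (arr.take n.toNat).length = n.toNat := by
    simp [List.length_take]; omega
  have h2 : i < ((arr.take n.toNat).length : Int) := by rw [hlen]; omega
  rw [PySem.List.pyGetD_eq_getElem arr 0 h0 (by omega),
      PySem.List.pyGetD_eq_getElem (arr.take n.toNat) 0 h0 h2]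
  rw [List.getElem_take]

-- A's double loop over indices a..len-1 of L produces pvS (L.drop a)
lemma pv_aLoop (L : List Int) :
    ∀ (k a : Nat) (acc : List Int), L.length - a = k →
    (PySem.List.pyRange (a : Int) (L.length : Int) 1).foldl
      (fun temp i => (PySem.List.pyRange (i + 1) (L.length : Int) 1).foldl
        (fun t j => if PySem.List.pyGetD L i 0 == PySem.List.pyGetD L j 0
                    then t ++ [PySem.List.pyGetD L i 0] else t) temp) acc
    = acc ++ pvS (L.drop a) := by
  intro k
  induction k with
  | zero =>
    intro a acc h
    rw [PySem.List.pyRange_one_eq_nil (by exact_mod_cast Nat.le_of_sub_eq_zero h),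
        List.drop_eq_nil_of_le (by omega)]
    simp [pvS]
  | succ k ih =>
    intro a acc h
    have ha : a < L.length := by omega
    rw [PySem.List.pyRange_one_cons (by exact_mod_cast ha), List.foldl_cons]
    have hx : PySem.List.pyGetD L (a : Int) 0 = L[a] := by
      rw [PySem.List.pyGetD_eq_getElem L 0 (by positivity) (by exact_mod_cast ha)]
      simp
    have hcast : ((a : Int) + 1) = ((a + 1 : Nat) : Int) := by push_cast; ring
    -- inner loop: scan the suffix after position a
    have hinner :
        (PySem.List.pyRange ((a : Int) + 1) (L.length : Int) 1).foldl
          (fun t j => if PySem.List.pyGetD L (a : Int) 0 == PySem.List.pyGetD L j 0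
                      then t ++ [PySem.List.pyGetD L (a : Int) 0] else t) acc
        = acc ++ List.replicate ((L.drop (a + 1)).count L[a]) L[a] := by
      rw [hcast, PySem.List.foldl_pyRange_pyGetD' L 0
            (fun t y => if PySem.List.pyGetD L (a : Int) 0 == y
                        then t ++ [PySem.List.pyGetD L (a : Int) 0] else t) acc (by positivity)]
      rw [hx]
      rw [PySem.List.foldl_append_if (fun y => L[a] == y) (fun _ => L[a])]
      rw [pv_filter_map_const]
      simp
    rw [hcast, ih (a + 1) _ (by omega)] at *
    rw [← hcast, hinner, List.append_assoc]
    congr 1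
    rw [List.drop_eq_getElem_cons ha]
    simp [pvS]

-- B's second loop: a dict holding the counts of the not-yet-emitted suffix drives the output
lemma pv_bLoop (L : List Int) :
    ∀ (d : PySem.Dict Int Int) (out : List Int), (∀ v, d.getD v 0 = (L.count v : Int)) →
    (L.foldl
      (fun (st : PySem.Dict Int Int × List Int) v =>
        (st.1.insert v (st.1.getD v 0 - 1),
         st.2 ++ List.replicate (st.1.getD v 0 - 1).toNat v)) (d, out)).2
    = out ++ pvS L := by
  induction L with
  | nil => intro d out _; simp [pvS]
  | cons v rest ih =>
    intro d out hd
    rw [List.foldl_cons]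
    have hv : d.getD v 0 - 1 = ((rest.count v : Nat) : Int) := by
      rw [hd v]; simp
    rw [ih _ _ ?_]
    · rw [hv]; simp [pvS, List.append_assoc]
    · intro w
      rw [PySem.Dict.getD_insert]
      by_cases hw : w = v
      · simp [hw, hv]
      · have hvw : v ≠ w := Ne.symm hw
        rw [if_neg hw, hd w]
        simp [hvw]

-- ===== VERDICT (by name: the statement is the Claim_ definition above) =====
theorem repeatingElement_spec : Claim_equal_repeatingElement := by
  intro arr n _ hpre
  unfold Spec_repeatingElement repeatingElement repeatingElement_alt
  by_cases h01 : n == 0 || n == 1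
  · simp [h01]
  · simp only [h01]
    by_cases hneg : n < 0
    · -- negative n: every range is empty, both sides return some []
      rw [PySem.List.pyRange_one_eq_nil (by omega : n - 1 ≤ 0),
          PySem.List.pyRange_one_eq_nil (by omega : n ≤ 0)]
      simp
    · -- 2 ≤ n ≤ arr.length
      have hn2 : 2 ≤ n := by
        simp only [Bool.or_eq_true, beq_iff_eq] at h01; omega
      have hlen : n ≤ (arr.length : Int) := by
        rcases hpre with h | h; omega; exact h
      set L := arr.take n.toNat with hL
      have hLlen : L.length = n.toNat := by
        simp [hL, List.length_take]; omega
      have hLc : (L.length : Int) = n := by rw [hLlen]; omega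
      -- replace arr by its n-prefix L inside every loop body
      have hcongrA :
          (PySem.List.pyRange 0 (n - 1) 1).foldl
            (fun temp i => (PySem.List.pyRange (i + 1) n 1).foldl
              (fun t j => if PySem.List.pyGetD arr i 0 == PySem.List.pyGetD arr j 0
                          then t ++ [PySem.List.pyGetD arr i 0] else t) temp) []
          = (PySem.List.pyRange 0 (n - 1) 1).foldl
            (fun temp i => (PySem.List.pyRange (i + 1) n 1).foldl
              (fun t j => if PySem.List.pyGetD L i 0 == PySem.List.pyGetD L j 0
                          then t ++ [PySem.List.pyGetD L i 0] else t) temp) [] := by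
        apply PySem.List.foldl_congr_mem
        intro acc i hi
        rw [PySem.List.mem_pyRange_one] at hi
        apply PySem.List.foldl_congr_mem
        intro t j hj
        rw [PySem.List.mem_pyRange_one] at hj
        rw [pv_getD_eq_take hlen hi.1 (by omega), pv_getD_eq_take hlen (by omega) hj.2]
      have hA :
          (PySem.List.pyRange 0 (n - 1) 1).foldl
            (fun temp i => (PySem.List.pyRange (i + 1) n 1).foldl
              (fun t j => if PySem.List.pyGetD L i 0 == PySem.List.pyGetD L j 0
                          then t ++ [PySem.List.pyGetD L i 0] else t) temp) []
          = (PySem.List.pyRange 0 n 1).foldl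
            (fun temp i => (PySem.List.pyRange (i + 1) n 1).foldl
              (fun t j => if PySem.List.pyGetD L i 0 == PySem.List.pyGetD L j 0
                          then t ++ [PySem.List.pyGetD L i 0] else t) temp) [] := by
        -- last iteration i = n-1 has an empty inner range, so it is a no-op
        have hsplit : PySem.List.pyRange 0 n 1 = PySem.List.pyRange 0 (n - 1) 1 ++ [n - 1] := by
          have h := PySem.List.pyRange_one_succ_right (a := 0) (b := n - 1) (by omega)
          rw [show n - 1 + 1 = n by ring] at h
          exact h
        conv_rhs => rw [hsplit]
        rw [List.foldl_append, List.foldl_cons, List.foldl_nil,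
            PySem.List.pyRange_one_eq_nil (by omega : n ≤ (n - 1) + 1), List.foldl_nil]
      set cntL : PySem.Dict Int Int :=
        L.foldl (fun (d : PySem.Dict Int Int) x => d.insert x (d.getD x 0 + (1:Int))) PySem.Dict.empty with hcntL
      have hcnt : ∀ v, cntL.getD v 0 = (L.count v : Int) := by
        intro v
        rw [hcntL, PySem.Dict.getD_foldl_insert_add_one]
        simp
      have e1 : (PySem.List.pyRange 0 n 1).foldl
            (fun d i => d.insert (PySem.List.pyGetD arr i 0)
              (d.getD (PySem.List.pyGetD arr i 0) 0 + 1))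
            (PySem.Dict.empty : PySem.Dict Int Int) = cntL := by
        rw [hcntL, ← hLc]
        refine Eq.trans ?_
          (PySem.List.foldl_pyRange_zero_pyGetD' L 0
            (fun (d : PySem.Dict Int Int) x => d.insert x (d.getD x 0 + (1:Int))) PySem.Dict.empty)
        apply PySem.List.foldl_congr_mem
        intro b i hi
        rw [PySem.List.mem_pyRange_one] at hi
        simp only [pv_getD_eq_take hlen hi.1 (by omega : i < n), hL]
      have e2 : ((PySem.List.pyRange 0 n 1).foldl
            (fun (st : PySem.Dict Int Int × List Int) i =>
              (st.1.insert (PySem.List.pyGetD arr i 0) (st.1.getD (PySem.List.pyGetD arr i 0) 0 - 1),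
               st.2 ++ List.replicate (st.1.getD (PySem.List.pyGetD arr i 0) 0 - 1).toNat
                 (PySem.List.pyGetD arr i 0)))
            (cntL, [])).2 = pvS L := by
        have estep : (PySem.List.pyRange 0 n 1).foldl
            (fun (st : PySem.Dict Int Int × List Int) i =>
              (st.1.insert (PySem.List.pyGetD arr i 0) (st.1.getD (PySem.List.pyGetD arr i 0) 0 - 1),
               st.2 ++ List.replicate (st.1.getD (PySem.List.pyGetD arr i 0) 0 - 1).toNat
                 (PySem.List.pyGetD arr i 0)))
            (cntL, [])
            = L.foldl
            (fun (st : PySem.Dict Int Int × List Int) v =>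
              (st.1.insert v (st.1.getD v 0 - 1),
               st.2 ++ List.replicate (st.1.getD v 0 - 1).toNat v)) (cntL, []) := by
          rw [← hLc]
          refine Eq.trans ?_
            (PySem.List.foldl_pyRange_zero_pyGetD' L 0
              (fun (st : PySem.Dict Int Int × List Int) v =>
                (st.1.insert v (st.1.getD v 0 - 1),
                 st.2 ++ List.replicate (st.1.getD v 0 - 1).toNat v)) (cntL, []))
          apply PySem.List.foldl_congr_mem
          intro b i hi
          rw [PySem.List.mem_pyRange_one] at hi
          simp only [pv_getD_eq_take hlen hi.1 (by omega : i < n), hL]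
        rw [estep, pv_bLoop L cntL [] hcnt]
        simp
      -- conclude
      rw [hcongrA, hA]
      have hAspec := pv_aLoop L (L.length) 0 [] (by simp)
      simp only [Nat.cast_zero] at hAspec
      rw [hLc] at hAspec
      rw [hAspec]
      simp only [List.nil_append, List.drop_zero, e1, e2]
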